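-- pv_equiv track=rewrite | github.com/sburdges-eng/totali | groundtruthos-data/survey-automation/src/survey_automation/parsers.py | _detect_duplicate_tail_block
-- ===== SOURCE A (Python) =====
-- def _normalize_tail_row(row: list[str]) -> tuple[str, ...]:
--     return tuple(cell.strip().upper() for cell in row)
--
-- def _detect_duplicate_tail_block(rows: list[tuple[int, list[str]]]) -> int:
--     if len(rows) < 2:
--         return 0
--     normalized_rows = [_normalize_tail_row(row) for _, row in rows]
--     max_block = min(len(normalized_rows) // 2, 200)
--     for block_size in range(max_block, 0, -1):
--         if normalized_rows[-block_size:] == normalized_rows[-2 * block_size : -block_size]: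
--             return block_size
--     return 0
-- ===== SOURCE B (Python) =====
-- def _normalize_tail_row(row):
--     return tuple(cell.strip().upper() for cell in row)
--
-- def _lcp(xs, ys):
--     k = 0
--     for x, y in zip(xs, ys):
--         if x != y:
--             break
--         k += 1
--     return k
--
-- def _detect_duplicate_tail_block(rows):
--     n = len(rows)
--     if n < 2:
--         return 0
--     rev = [_normalize_tail_row(row) for _, row in reversed(rows)]
--     max_block = min(n // 2, 200)
--     # z[b-1] = length of the longest common prefix of rev and rev[b:]
--     z = [_lcp(rev, rev[b:]) for b in range(1, max_block + 1)]
--     for b in range(max_block, 0, -1):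
--         if z[b - 1] >= b:
--             return b
--     return 0
-- ===== Notes on version B (the rewrite author's own statement) =====
-- stated objective: alternative
-- what changed: Instead of comparing two negative slices of the normalized list for every candidate block size, B reverses the normalized rows once, precomputes a table z of longest-common-prefix lengths between the reversed list and each of its suffixes (a naive Z-table, one entry per candidate), and then finds the answer by a lookup-driven scan using z[b-1] >= b.
import Mathlib
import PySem

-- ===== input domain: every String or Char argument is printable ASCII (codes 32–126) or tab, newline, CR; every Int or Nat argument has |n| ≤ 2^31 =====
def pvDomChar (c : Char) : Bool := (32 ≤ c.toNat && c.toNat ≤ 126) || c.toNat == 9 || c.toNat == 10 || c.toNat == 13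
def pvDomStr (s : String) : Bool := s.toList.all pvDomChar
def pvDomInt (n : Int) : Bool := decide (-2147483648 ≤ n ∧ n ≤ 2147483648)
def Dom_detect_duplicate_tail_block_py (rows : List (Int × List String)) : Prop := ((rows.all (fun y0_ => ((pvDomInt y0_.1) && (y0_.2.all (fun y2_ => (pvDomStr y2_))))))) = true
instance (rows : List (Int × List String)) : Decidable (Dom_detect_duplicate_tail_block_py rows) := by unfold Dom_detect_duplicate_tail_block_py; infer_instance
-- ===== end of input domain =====

-- B replaces A's per-candidate negative-slice comparisons with one reversed row list and a
-- precomputed table of longest-common-prefix lengths (a naive Z-table), then a lookup-driven scan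
-- (objective: alternative decomposition, same exact result).

-- ===== PORT A =====
-- _normalize_tail_row (shared by both Python versions verbatim)
def pvNormRow (row : List String) : List String :=
  row.map (fun cell => PySem.Str.upper (PySem.Str.strip cell))

-- the 'for block_size in range(max_block, 0, -1): … return block_size' loop of A
def pvScanA (normalized : List (List String)) : List Int → Int
  | [] => 0
  | b :: rest =>
    if PySem.List.slice normalized (some (-b)) none =
       PySem.List.slice normalized (some (-(2 * b))) (some (-b)) then b
    else pvScanA normalized rest

def detect_duplicate_tail_block_py (rows : List (Int × List String)) : Int :=
  if rows.length < 2 then 0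
  else
    let normalized := rows.map (fun p => pvNormRow p.2)
    let max_block : Int := min (PySem.Int.floordiv (normalized.length : Int) 2) 200
    pvScanA normalized (PySem.List.pyRange max_block 0 (-1))

-- ===== PORT B =====
-- _lcp: counts matching leading pairs, stops at the first mismatch (the zip/break loop)
def pvLcp : List (List String) → List (List String) → Int
  | x :: xs, y :: ys => if x = y then 1 + pvLcp xs ys else 0
  | _, _ => 0

-- the 'for b in range(max_block, 0, -1): … return b' loop of B (z[b-1] >= b lookup)
def pvScanB (z : List Int) : List Int → Int
  | [] => 0
  | b :: rest => if b ≤ PySem.List.pyGetD z (b - 1) 0 then b else pvScanB z rest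

def detect_duplicate_tail_block_py_alt (rows : List (Int × List String)) : Int :=
  let n : Int := rows.length
  if n < 2 then 0
  else
    let rev := rows.reverse.map (fun p => pvNormRow p.2)
    let max_block : Int := min (PySem.Int.floordiv n 2) 200
    let z := (PySem.List.pyRange 1 (max_block + 1) 1).map
      (fun b => pvLcp rev (PySem.List.slice rev (some b) none))
    pvScanB z (PySem.List.pyRange max_block 0 (-1))

-- ===== PRECONDITION & SPEC =====
def Spec_detect_duplicate_tail_block_py (rows : List (Int × List String)) (out : Int) : Prop := out = detect_duplicate_tail_block_py_alt rows
instance (rows : List (Int × List String)) (out : Int) : Decidable (Spec_detect_duplicate_tail_block_py rows out) := by unfold Spec_detect_duplicate_tail_block_py; infer_instance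

-- ===== CLAIM (what is proved, stated in full; the proofs are below) =====
def Claim_equal_detect_duplicate_tail_block_py : Prop := ∀ (rows : List (Int × List String)), Dom_detect_duplicate_tail_block_py rows → Spec_detect_duplicate_tail_block_py rows (detect_duplicate_tail_block_py rows)

-- ===== LEMMAS AND PROOFS =====

theorem pvLcp_nonneg (xs ys : List (List String)) : 0 ≤ pvLcp xs ys := by
  induction xs generalizing ys with
  | nil => simp [pvLcp]
  | cons x xs ih =>
    cases ys with
    | nil => simp [pvLcp]
    | cons y ys =>
      simp only [pvLcp]
      split
      · have := ih ys; omega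
      · omega

-- k ≤ lcp xs ys  ↔  the first k elements agree (when both lists have at least k elements)
theorem pvLcp_ge_iff (k : Nat) (xs ys : List (List String))
    (hx : k ≤ xs.length) (hy : k ≤ ys.length) :
    ((k : Int) ≤ pvLcp xs ys) ↔ xs.take k = ys.take k := by
  induction k generalizing xs ys with
  | zero => simpa using pvLcp_nonneg xs ys
  | succ k ih =>
    cases xs with
    | nil => simp at hx
    | cons x xs =>
      cases ys with
      | nil => simp at hy
      | cons y ys =>
        simp only [List.length_cons] at hx hy
        simp only [pvLcp, List.take_succ_cons]
        by_cases hxy : x = y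
        · subst hxy
          simp only [List.cons.injEq, true_and]
          rw [← ih xs ys (by omega) (by omega)]
          push_cast
          omega
        · simp only [if_neg hxy]
          constructor
          · intro h; omega
          · intro h; exact absurd (List.cons.injEq .. ▸ h).1 hxy

-- the two loops agree when every candidate b in the list satisfies 1 ≤ b ≤ max_block
theorem pvScan_eq (L : List (List String)) (mb : Int)
    (hmb2 : 2 * mb.toNat ≤ L.length)
    (r : List Int) (hr : ∀ b ∈ r, 1 ≤ b ∧ b ≤ mb) :
    pvScanA L r =
      pvScanB ((PySem.List.pyRange 1 (mb + 1) 1).map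
        (fun b => pvLcp L.reverse (PySem.List.slice L.reverse (some b) none))) r := by
  induction r with
  | nil => rfl
  | cons b rest ih =>
    obtain ⟨hb1, hbm⟩ := hr b (by simp)
    have hrest := fun x hx => hr x (List.mem_cons_of_mem _ hx)
    set n := L.length with hn
    -- b as a natural number k
    obtain ⟨k, hk⟩ : ∃ k : Nat, b = (k : Int) := ⟨b.toNat, by omega⟩
    have hk1 : 1 ≤ k := by omega
    have hkmb : (k : Int) ≤ mb := by omega
    have h2k : 2 * k ≤ n := by omega
    -- A's condition: L[-b:] = L[-2b:-b]
    have hsliceA : PySem.List.slice L (some (-b)) none = L.drop (n - k) := by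
      rw [hk]; exact PySem.List.slice_from_neg_natCast L k (by omega)
    have hsliceA2 : PySem.List.slice L (some (-(2 * b))) (some (-b)) =
        (L.drop (n - 2 * k)).take k := by
      subst hk
      have ca : PySem.List.clampIdx L.length (-(2 * (k : Int))) = n - 2 * k := by
        simp only [PySem.List.clampIdx]; split_ifs <;> omega
      have cb : PySem.List.clampIdx L.length (-(k : Int)) = n - k := by
        simp only [PySem.List.clampIdx]; split_ifs <;> omega
      simp only [PySem.List.slice, ca, cb]
      congr 1
      omega
    -- rephrase via the reversed list
    have hdropk : L.drop (n - k) = (L.reverse.take k).reverse := by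
      rw [List.reverse_take]; simp [hn]
    have hmid : (L.drop (n - 2 * k)).take k = ((L.reverse.drop k).take k).reverse := by
      have h1 : L.drop (n - 2 * k) = (L.reverse.take (2 * k)).reverse := by
        rw [List.reverse_take]; simp [hn]
      rw [h1, List.take_reverse]
      have hlen2k : (List.take (2 * k) L.reverse).length = 2 * k := by
        simp; omega
      simp only [hlen2k, show 2 * k - k = k from by omega]
      congr 1
      rw [List.drop_take]
      congr 1
      omega
    have hcondA : (PySem.List.slice L (some (-b)) none =
        PySem.List.slice L (some (-(2 * b))) (some (-b))) ↔
        L.reverse.take k = (L.reverse.drop k).take k := by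
      rw [hsliceA, hsliceA2, hdropk, hmid]
      exact ⟨fun h => List.reverse_injective h, fun h => by rw [h]⟩
    -- B's condition: b ≤ z[b-1]
    have hzb : PySem.List.pyGetD
        ((PySem.List.pyRange 1 (mb + 1) 1).map
          (fun b => pvLcp L.reverse (PySem.List.slice L.reverse (some b) none))) (b - 1) 0
        = pvLcp L.reverse (L.reverse.drop k) := by
      have hb1' : b - 1 = ((k - 1 : Nat) : Int) := by omega
      rw [hb1', PySem.List.pyGetD_map_pyRange_one _ 1 (mb + 1) (k - 1) 0 (by omega)]
      have : (1 : Int) + ((k - 1 : Nat) : Int) = (k : Int) := by omega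
      rw [this, PySem.List.slice_from_natCast]
    have hcondB : (b ≤ PySem.List.pyGetD
        ((PySem.List.pyRange 1 (mb + 1) 1).map
          (fun b => pvLcp L.reverse (PySem.List.slice L.reverse (some b) none))) (b - 1) 0) ↔
        L.reverse.take k = (L.reverse.drop k).take k := by
      rw [hzb, hk]
      exact pvLcp_ge_iff k L.reverse (L.reverse.drop k) (by simp; omega)
        (by simp; omega)
    -- combine
    simp only [pvScanA, pvScanB]
    by_cases hA : PySem.List.slice L (some (-b)) none =
        PySem.List.slice L (some (-(2 * b))) (some (-b))
    · rw [if_pos hA, if_pos (hcondB.mpr (hcondA.mp hA))]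
    · rw [if_neg hA, if_neg (fun h => hA (hcondA.mpr (hcondB.mp h))), ih hrest]

-- ===== VERDICT (by name: the statement is the Claim_ definition above) =====
theorem detect_duplicate_tail_block_py_spec : Claim_equal_detect_duplicate_tail_block_py := by
  intro rows _
  unfold Spec_detect_duplicate_tail_block_py
  unfold detect_duplicate_tail_block_py detect_duplicate_tail_block_py_alt
  by_cases h2 : rows.length < 2
  · rw [if_pos h2, if_pos (by exact_mod_cast h2)]
  · rw [if_neg h2, if_neg (by exact_mod_cast h2)]
    set L := rows.map (fun p => pvNormRow p.2) with hL
    have hlen : L.length = rows.length := by simp [hL]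
    have hrev : rows.reverse.map (fun p => pvNormRow p.2) = L.reverse := by
      simp [hL, List.map_reverse]
    set mb : Int := min (PySem.Int.floordiv (rows.length : Int) 2) 200 with hmb
    have hmbL : min (PySem.Int.floordiv (L.length : Int) 2) 200 = mb := by rw [hlen]
    have hmb2 : 2 * mb.toNat ≤ L.length := by
      rw [hlen]
      have := PySem.Int.floordiv_natCast rows.length 2
      have h2' : (PySem.Int.floordiv (rows.length : Int) 2) = ((rows.length / 2 : Nat) : Int) := this
      have := Nat.div_mul_le_self rows.length 2
      omega
    show pvScanA L (PySem.List.pyRange (min (PySem.Int.floordiv ((L.length : Int)) 2) 200) 0 (-1)) =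
      pvScanB ((PySem.List.pyRange 1 (mb + 1) 1).map
        (fun b => pvLcp (rows.reverse.map (fun p => pvNormRow p.2))
          (PySem.List.slice (rows.reverse.map (fun p => pvNormRow p.2)) (some b) none)))
        (PySem.List.pyRange mb 0 (-1))
    rw [hmbL, hrev]
    exact pvScan_eq L mb hmb2 _
      (fun b hb => by
        rw [PySem.List.mem_pyRange_neg_one] at hb
        omega)
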